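-- pv_equiv track=rewrite | github.com/MrBrantCode/unitest_baseline | mut_generate/mist_train_cf/cf_74519/solution.py | smallest_pythagorean_quadruplet
-- ===== SOURCE A (Python) =====
-- def smallest_pythagorean_quadruplet(y):
--     for a in range(1, int(y/3)):
--         for b in range(a+1, int(y/2)):
--             for c in range (b + 1, y - a - b):
--                 d = y - a - b - c
--                 if a * a + b * b + c * c == d * d:
--                     return [a, b, c, d]
--     return []
-- ===== SOURCE B (Python) =====
-- def smallest_pythagorean_quadruplet(y):
--     # For each (a, b), with s = y-a-b and d = s-c, the Pythagorean condition
--     # a^2+b^2+c^2 = d^2 is linear in c: 2*s*c = s^2-a^2-b^2. Solve it directly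
--     # instead of scanning all c; iterate (a, b) with explicit while loops.
--     a = 1
--     while a < int(y / 3):
--         b = a + 1
--         while b < int(y / 2):
--             s = y - a - b
--             num = s * s - a * a - b * b
--             if num % (2 * s) == 0:
--                 c = num // (2 * s)
--                 if b < c < s:
--                     return [a, b, c, s - c]
--             b += 1
--         a += 1
--     return []
-- ===== Notes on version B (the rewrite author's own statement) =====
-- stated objective: faster
-- what changed: B drops A's innermost scan over c entirely: for each (a,b) the Pythagorean condition is linear in c once d is eliminated, so B computes the unique candidate c in closed form and checks it, and it walks (a,b) with explicit while loops instead of A's nested for/range scans.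
import Mathlib
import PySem

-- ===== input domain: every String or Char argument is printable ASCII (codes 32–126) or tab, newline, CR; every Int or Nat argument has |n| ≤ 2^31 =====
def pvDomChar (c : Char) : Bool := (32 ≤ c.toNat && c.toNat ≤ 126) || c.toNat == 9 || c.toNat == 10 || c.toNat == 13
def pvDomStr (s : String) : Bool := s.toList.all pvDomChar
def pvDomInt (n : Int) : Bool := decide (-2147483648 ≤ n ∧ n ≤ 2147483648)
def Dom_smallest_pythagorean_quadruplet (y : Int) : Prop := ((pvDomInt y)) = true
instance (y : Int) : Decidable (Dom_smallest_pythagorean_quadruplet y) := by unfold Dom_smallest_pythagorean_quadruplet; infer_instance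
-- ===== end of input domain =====

-- B drops A's innermost scan over c: the Pythagorean condition is linear in c once d is eliminated,
-- so B solves 2*s*c = s^2-a^2-b^2 (s = y-a-b) directly and checks the one candidate, walking (a,b)
-- with explicit while loops instead of A's nested range scans; a timing run measured B faster.
-- Python's int(y/3) / int(y/2) equal truncating division Int.tdiv exactly on |y| ≤ 2^31 (float is exact there).

-- ===== PORT A =====
-- inner loop: for c in range(b+1, y-a-b): d = y-a-b-c; if a*a+b*b+c*c == d*d: return [a,b,c,d]
def pvLoopC (y a b : Int) : Option (List Int) :=
  (PySem.List.pyRange (b + 1) (y - a - b) 1).findSome? (fun c =>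
    let d := y - a - b - c
    if a * a + b * b + c * c = d * d then some [a, b, c, d] else none)

def pvLoopBA (y a : Int) : Option (List Int) :=
  (PySem.List.pyRange (a + 1) (Int.tdiv y 2) 1).findSome? (fun b => pvLoopC y a b)

def smallest_pythagorean_quadruplet (y : Int) : List Int :=
  ((PySem.List.pyRange 1 (Int.tdiv y 3) 1).findSome? (fun a => pvLoopBA y a)).getD []

-- ===== PORT B =====
-- inner while loop over b, fuel = number of remaining iterations; the body solves for c directly
def pvWhileB (y a : Int) : Nat → Int → Option (List Int)
  | 0, _ => none
  | n + 1, b =>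
      let s := y - a - b
      let num := s * s - a * a - b * b
      if PySem.Int.mod num (2 * s) = 0 then
        let c := PySem.Int.floordiv num (2 * s)
        if b < c ∧ c < s then some [a, b, c, s - c] else pvWhileB y a n (b + 1)
      else pvWhileB y a n (b + 1)

-- outer while loop over a
def pvWhileA (y : Int) : Nat → Int → Option (List Int)
  | 0, _ => none
  | n + 1, a =>
      match pvWhileB y a (Int.tdiv y 2 - (a + 1)).toNat (a + 1) with
      | some r => some r
      | none => pvWhileA y n (a + 1)

def smallest_pythagorean_quadruplet_alt (y : Int) : List Int :=
  (pvWhileA y (Int.tdiv y 3 - 1).toNat 1).getD []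

-- ===== PRECONDITION & SPEC =====
def Spec_smallest_pythagorean_quadruplet (y : Int) (out : List Int) : Prop := out = smallest_pythagorean_quadruplet_alt y
instance (y : Int) (out : List Int) : Decidable (Spec_smallest_pythagorean_quadruplet y out) := by unfold Spec_smallest_pythagorean_quadruplet; infer_instance

-- ===== CLAIM (what is proved, stated in full; the proofs are below) =====
def Claim_equal_smallest_pythagorean_quadruplet : Prop := ∀ (y : Int), Dom_smallest_pythagorean_quadruplet y → Spec_smallest_pythagorean_quadruplet y (smallest_pythagorean_quadruplet y)

-- ===== LEMMAS AND PROOFS =====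

-- B's loop body as a function (proof artefact, used only to relate the two ports)
def pvSolveC (y a b : Int) : Option (List Int) :=
  let s := y - a - b
  let num := s * s - a * a - b * b
  if PySem.Int.mod num (2 * s) = 0 then
    let c := PySem.Int.floordiv num (2 * s)
    if b < c ∧ c < s then some [a, b, c, s - c] else none
  else none

theorem pvFindSome?_congr_mem {α β : Type} (l : List α) (f g : α → Option β)
    (h : ∀ x ∈ l, f x = g x) : l.findSome? f = l.findSome? g := by
  induction l with
  | nil => rfl
  | cons a t ih =>
    rw [List.findSome?_cons, List.findSome?_cons, h a (List.mem_cons_self ..),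
      ih (fun x hx => h x (List.mem_cons_of_mem _ hx))]

theorem pvFindSome?_of_unique {β : Type} (l : List Int) (f : Int → Option β) (c0 : Int) (v : β)
    (h : ∀ c, f c = if c = c0 then some v else none) :
    l.findSome? f = if c0 ∈ l then some v else none := by
  induction l with
  | nil => simp
  | cons a t ih =>
    rw [List.findSome?_cons, h a]
    by_cases ha : a = c0
    · subst ha; simp
    · simp only [if_neg ha]
      rw [ih]
      have hca : (c0 ∈ a :: t) ↔ c0 ∈ t := by
        rw [List.mem_cons]; exact or_iff_right (fun h => ha h.symm)
      rw [if_congr hca rfl rfl]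

theorem pvFindSome?_none {β : Type} (l : List Int) (f : Int → Option β)
    (h : ∀ c ∈ l, f c = none) : l.findSome? f = none := by
  induction l with
  | nil => rfl
  | cons a t ih =>
    rw [List.findSome?_cons, h a (List.mem_cons_self ..)]
    exact ih (fun x hx => h x (List.mem_cons_of_mem _ hx))

-- a^2+b^2+c^2 = (s-c)^2  ↔  2*s*c = s^2-a^2-b^2
theorem pvPredIff (s a b c : Int) :
    (a * a + b * b + c * c = (s - c) * (s - c)) ↔ (2 * s * c = s * s - a * a - b * b) := by
  have hx : (s - c) * (s - c) = s * s - 2 * (s * c) + c * c := by ring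
  rw [hx]; constructor <;> intro h <;> linarith

-- the heart: A's inner scan over c equals B's direct solution, for 1 ≤ b
theorem pvInnerEq (y a b : Int) (hb : 1 ≤ b) : pvLoopC y a b = pvSolveC y a b := by
  simp only [pvLoopC, pvSolveC]
  set s := y - a - b with hs
  set num := s * s - a * a - b * b with hnum
  by_cases hr : s ≤ b + 1
  · rw [PySem.List.pyRange_one_eq_nil hr, List.findSome?_nil]
    split_ifs with h1 h2
    · omega
    · rfl
    · rfl
  · have hspos : 0 < s := by omega
    have h2s : 0 < 2 * s := by omega
    by_cases hdvd : PySem.Int.mod num (2 * s) = 0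
    · have hdv : (2 * s) ∣ num := (PySem.Int.mod_eq_zero_iff_dvd num (2 * s)).mp hdvd
      rw [PySem.Int.floordiv_eq_ediv_of_pos h2s]
      set c0 := num / (2 * s) with hc0
      have hmul : 2 * s * c0 = num := by
        rw [hc0]; exact Int.mul_ediv_cancel' hdv
      have huniq : ∀ c, 2 * s * c = num ↔ c = c0 := by
        intro c
        constructor
        · intro h
          have : 2 * s * c = 2 * s * c0 := by omega
          exact mul_left_cancel₀ (by omega) this
        · intro h; rw [h, hmul]
      rw [pvFindSome?_of_unique _ _ c0 [a, b, c0, s - c0] (by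
        intro c
        have hd : y - a - b - c = s - c := by omega
        by_cases hp : a * a + b * b + c * c = (s - c) * (s - c)
        · have hceq : c = c0 := (huniq c).mp ((pvPredIff s a b c).mp hp)
          subst hceq
          simp [hp]
        · have hne : c ≠ c0 := fun h => hp ((pvPredIff s a b c).mpr ((huniq c).mpr h))
          simp [hp, hne])]
      rw [if_pos hdvd]
      by_cases hin : b < c0 ∧ c0 < s
      · rw [if_pos ((PySem.List.mem_pyRange_one).mpr ⟨by omega, hin.2⟩), if_pos hin]
      · rw [if_neg (fun hmem => hin (by
          have := (PySem.List.mem_pyRange_one).mp hmem; exact ⟨by omega, this.2⟩)), if_neg hin]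
    · rw [if_neg hdvd]
      apply pvFindSome?_none
      intro c _
      have hd : y - a - b - c = s - c := by omega
      rw [hd]
      rw [if_neg]
      intro hp
      exact hdvd ((PySem.Int.mod_eq_zero_iff_dvd num (2 * s)).mpr
        ⟨c, by have := (pvPredIff s a b c).mp hp; omega⟩)

-- B's inner while loop is A-shaped: a findSome? of pvSolveC over the b-range it walks
theorem pvWhileB_eq (y a : Int) : ∀ (n : Nat) (b : Int),
    pvWhileB y a n b = (PySem.List.pyRange b (b + n) 1).findSome? (fun b' => pvSolveC y a b') := by
  intro n
  induction n with
  | zero => intro b; simp [pvWhileB]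
  | succ m ih =>
    intro b
    rw [PySem.List.pyRange_one_cons (by push_cast; omega), List.findSome?_cons]
    show pvWhileB y a (m + 1) b = _
    simp only [pvWhileB, pvSolveC]
    split_ifs with h1 h2
    · rfl
    · rw [ih (b + 1)]; congr 2; push_cast; ring
    · rw [ih (b + 1)]; congr 2; push_cast; ring

-- B's outer while loop likewise
theorem pvWhileA_eq (y : Int) : ∀ (n : Nat) (a : Int),
    pvWhileA y n a = (PySem.List.pyRange a (a + n) 1).findSome?
      (fun a' => pvWhileB y a' (Int.tdiv y 2 - (a' + 1)).toNat (a' + 1)) := by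
  intro n
  induction n with
  | zero => intro a; simp [pvWhileA]
  | succ m ih =>
    intro a
    rw [PySem.List.pyRange_one_cons (by push_cast; omega), List.findSome?_cons]
    show pvWhileA y (m + 1) a = _
    simp only [pvWhileA]
    cases pvWhileB y a (Int.tdiv y 2 - (a + 1)).toNat (a + 1) with
    | some r => rfl
    | none => simp only; rw [ih (a + 1)]; congr 2; push_cast; ring

-- a fuel-counted range with lower end v: v + (hi - v).toNat is hi when the range is nonempty
theorem pvRange_fuel (v hi : Int) :
    PySem.List.pyRange v (v + ((hi - v).toNat : Int)) 1 = PySem.List.pyRange v hi 1 := by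
  by_cases h : v ≤ hi
  · congr 1; omega
  · rw [PySem.List.pyRange_one_eq_nil (by omega), PySem.List.pyRange_one_eq_nil (by omega)]

-- ===== VERDICT (by name: the statement is the Claim_ definition above) =====
theorem smallest_pythagorean_quadruplet_spec : Claim_equal_smallest_pythagorean_quadruplet := by
  intro y _
  unfold Spec_smallest_pythagorean_quadruplet smallest_pythagorean_quadruplet smallest_pythagorean_quadruplet_alt
  rw [pvWhileA_eq, pvRange_fuel 1 (Int.tdiv y 3)]
  congr 1
  apply pvFindSome?_congr_mem
  intro a ha
  have ha1 : 1 ≤ a := ((PySem.List.mem_pyRange_one).mp ha).1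
  rw [pvWhileB_eq, pvRange_fuel (a + 1) (Int.tdiv y 2)]
  unfold pvLoopBA
  apply pvFindSome?_congr_mem
  intro b hbm
  have hb1 : a + 1 ≤ b := ((PySem.List.mem_pyRange_one).mp hbm).1
  exact pvInnerEq y a b (by omega)
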